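-- pv_equiv track=rewrite | github.com/Zan1456/2022a | Achívum/Ágazati vizsga10A/feladatok/2feladat.py | nullakm
-- ===== SOURCE A (Python) =====
-- def nullakm(lista):
--     nulla = 0
--     for i in range(len(lista)):
--         for j in range(len(lista[i])):
--             if not j == 0:
--                 if lista[i][j] == 0:
--                     nulla += 1
--     return nulla
-- ===== SOURCE B (Python) =====
-- def nullakm(lista):
--     total = sum(r.count(0) for r in lista)
--     first = sum(1 for r in lista if r and r[0] == 0)
--     return total - first
-- ===== Notes on version B (the rewrite author's own statement) =====
-- stated objective: simpler
-- what changed: Replaces the indexed double loop with the j!=0 guard by two flat passes: sum of whole-row zero counts via r.count(0), minus a count of rows whose first element is zero.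
import Mathlib
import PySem

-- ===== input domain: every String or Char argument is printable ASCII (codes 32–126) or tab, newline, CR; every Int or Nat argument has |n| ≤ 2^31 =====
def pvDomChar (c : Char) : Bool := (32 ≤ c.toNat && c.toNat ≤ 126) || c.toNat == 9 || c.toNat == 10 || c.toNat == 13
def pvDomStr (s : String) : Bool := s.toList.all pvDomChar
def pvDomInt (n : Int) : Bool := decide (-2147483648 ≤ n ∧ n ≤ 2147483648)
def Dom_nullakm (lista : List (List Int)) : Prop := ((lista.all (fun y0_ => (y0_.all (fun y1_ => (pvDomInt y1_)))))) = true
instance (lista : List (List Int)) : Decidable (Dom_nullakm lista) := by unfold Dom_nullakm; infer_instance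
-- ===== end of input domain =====

-- B replaces A's indexed double loop with the j!=0 guard by two flat passes:
-- total zeros per row minus rows whose first element is zero (objective: simpler).


-- ===== PORT A =====
def nullakm (lista : List (List Int)) : Int :=
  (PySem.List.pyRange 0 (PySem.List.len lista) 1).foldl (fun nulla i =>
    (PySem.List.pyRange 0 (PySem.List.len (PySem.List.pyGetD lista i [])) 1).foldl (fun n j =>
      if ¬ (j = 0) then
        (if PySem.List.pyGetD (PySem.List.pyGetD lista i []) j 1 = 0 then n + 1 else n)
      else n) nulla) 0

-- ===== PORT B =====
def nullakm_alt (lista : List (List Int)) : Int :=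
  (lista.map (fun r => (PySem.List.count r 0 : Int))).sum -
  (lista.map (fun r => if r ≠ [] ∧ r.headD 1 = 0 then (1 : Int) else 0)).sum

-- ===== PRECONDITION & SPEC =====
def Spec_nullakm (lista : List (List Int)) (out : Int) : Prop := out = nullakm_alt lista
instance (lista : List (List Int)) (out : Int) : Decidable (Spec_nullakm lista out) := by unfold Spec_nullakm; infer_instance

-- ===== CLAIM (what is proved, stated in full; the proofs are below) =====
def Claim_equal_nullakm : Prop := ∀ (lista : List (List Int)), Dom_nullakm lista → Spec_nullakm lista (nullakm lista)

-- ===== LEMMAS AND PROOFS =====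

-- A's inner loop over one row: zeros in the whole row, minus 1 if the head is zero.
theorem nullakm_inner (row : List Int) (acc : Int) :
    (PySem.List.pyRange 0 (PySem.List.len row) 1).foldl (fun n j =>
      if ¬ (j = 0) then (if PySem.List.pyGetD row j 1 = 0 then n + 1 else n) else n) acc
    = acc + ((PySem.List.count row 0 : Int) -
        (if row ≠ [] ∧ row.headD 1 = 0 then (1 : Int) else 0)) := by
  cases row with
  | nil => simp [PySem.List.pyRange_one_eq_nil, PySem.List.count]
  | cons h t =>
    have hn : (0:Int) < PySem.List.len (h :: t) := by simp
    rw [PySem.List.pyRange_one_cons hn]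
    simp only [List.foldl_cons, not_true, if_false, zero_add]
    rw [PySem.List.foldl_congr_mem (PySem.List.pyRange 1 (PySem.List.len (h :: t)))
        (fun n j => if ¬ (j = 0) then (if PySem.List.pyGetD (h::t) j 1 = 0 then n + 1 else n) else n)
        (fun n j => if PySem.List.pyGetD (h::t) j 1 = 0 then n + 1 else n) acc
        (by intro a j hj; have := (PySem.List.mem_pyRange_one.mp hj).1; simp [show ¬ (j = 0) by omega])]
    rw [PySem.List.foldl_pyRange_pyGetD (h::t) 1 (fun n v => if v = 0 then n + 1 else n) acc (by norm_num : (0:Int) ≤ 1)]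
    rw [PySem.List.foldl_ite_add_one (fun v => v = 0)]
    simp [PySem.List.count, List.count_cons]
    have hc : List.countP (fun x => x == (0:Int)) t = List.countP (fun x => decide (x = 0)) t :=
      List.countP_congr (fun x _ => by simp)
    by_cases hh : h = 0
    · simp [List.count, hc]
    · simp [List.count, hc, hh]

-- sum of a map of a difference splits into the difference of the two sums
theorem sum_map_sub_int {α : Type} (l : List α) (f g : α → Int) :
    (l.map (fun x => f x - g x)).sum = (l.map f).sum - (l.map g).sum := by
  induction l with
  | nil => simp
  | cons h t ih => simp [ih]; ring

-- ===== VERDICT (by name: the statement is the Claim_ definition above) =====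
theorem nullakm_spec : Claim_equal_nullakm := by
  intro lista _
  unfold Spec_nullakm nullakm nullakm_alt
  rw [PySem.List.foldl_pyRange_zero_pyGetD lista []
      (fun (n : Int) (row : List Int) =>
        (PySem.List.pyRange 0 (PySem.List.len row) 1).foldl (fun n j =>
          if ¬ (j = 0) then (if PySem.List.pyGetD row j 1 = 0 then n + 1 else n) else n) n) 0]
  rw [PySem.List.foldl_congr_mem lista _
      (fun (n : Int) (row : List Int) =>
        n + ((PySem.List.count row 0 : Int) - (if row ≠ [] ∧ row.headD 1 = 0 then (1 : Int) else 0)))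
      0 (by intro acc row _; exact nullakm_inner row acc)]
  rw [PySem.List.foldl_add]
  rw [sum_map_sub_int]
  ring
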